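-- pv_equiv track=rewrite | github.com/Singh-Lab/ARIES | msa_tools.py | reorder_by_sequences
-- ===== SOURCE A (Python) =====
-- from collections import defaultdict, Counter
--
-- def reorder_by_sequences(refs, preds, gap_chars=('-', '.')):
--     def ungap(s):
--         for g in gap_chars:
--             s = s.replace(g, '')
--         return s
--
--     ref_ungapped = [ungap(s) for s in refs]
--     pred_ungapped = [ungap(s) for s in preds]
--     # Multiset equality check (same sequences, same multiplicities)
--     assert Counter(ref_ungapped) == Counter(pred_ungapped), \
--         "refs/preds don't contain the same set of ungapped sequences"
--     # Map ungapped -> queue of indices in preds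
--     idx_map = defaultdict(list)
--     for j, u in enumerate(pred_ungapped):
--         idx_map[u].append(j)
--     # Reorder by popping from each queue in ref order
--     reordered = []
--     for u in ref_ungapped:
--         j = idx_map[u].pop(0)
--         reordered.append(preds[j])
--     return reordered
-- ===== SOURCE B (Python) =====
-- def reorder_by_sequences(refs, preds, gap_chars=('-', '.')):
--     def ungap(s):
--         for g in gap_chars:
--             s = s.replace(g, '')
--         return s
--
--     ref_ungapped = [ungap(s) for s in refs]
--     pred_ungapped = [ungap(s) for s in preds]
--     assert sorted(ref_ungapped) == sorted(pred_ungapped), \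
--         "refs/preds don't contain the same set of ungapped sequences"
--     # Rank-matching by stable sort: the t-th ranked ref position (by ungapped
--     # value, original order breaking ties) receives the t-th ranked pred, which
--     # reproduces FIFO pairing within equal values; scatter into ref positions.
--     ref_order = sorted(range(len(refs)), key=lambda i: ref_ungapped[i])
--     pred_order = sorted(range(len(preds)), key=lambda j: pred_ungapped[j])
--     result = [None] * len(refs)
--     for i, j in zip(ref_order, pred_order):
--         result[i] = preds[j]
--     return result
-- ===== Notes on version B (the rewrite author's own statement) =====
-- stated objective: alternative
-- what changed: Replaces the Counter multiset check and the defaultdict-of-index-queues matching loop by sort-based rank matching: both index ranges are stably sorted by ungapped value, zipped rank-to-rank, and each matched pred is scattered into its ref's original position.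
import Mathlib
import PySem

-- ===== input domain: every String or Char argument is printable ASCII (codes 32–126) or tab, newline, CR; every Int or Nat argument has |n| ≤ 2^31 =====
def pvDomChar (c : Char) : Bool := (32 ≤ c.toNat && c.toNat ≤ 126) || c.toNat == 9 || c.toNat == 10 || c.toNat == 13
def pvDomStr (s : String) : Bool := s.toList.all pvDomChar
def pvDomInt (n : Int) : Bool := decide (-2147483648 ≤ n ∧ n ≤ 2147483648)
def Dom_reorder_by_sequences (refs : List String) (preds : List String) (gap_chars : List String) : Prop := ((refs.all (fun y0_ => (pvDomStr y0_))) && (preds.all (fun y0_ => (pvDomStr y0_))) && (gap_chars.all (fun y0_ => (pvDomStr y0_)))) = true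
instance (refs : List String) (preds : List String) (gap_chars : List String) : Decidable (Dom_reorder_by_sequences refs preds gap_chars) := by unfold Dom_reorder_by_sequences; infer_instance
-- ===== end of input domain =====

-- B replaces the dict-of-index-queues matching by sort-based rank matching: both
-- index ranges are stably sorted by ungapped value, zipped, and each matched pred
-- is scattered into its ref's original position ("alternative").

-- ===== PORT A =====
-- shared helper: both Pythons define the identical inner 'ungap'
def pvUngap (gap_chars : List String) (s : String) : String :=
  gap_chars.foldl (fun acc g => PySem.Str.replace acc g "") s

def reorder_by_sequences (refs : List String) (preds : List String) (gap_chars : List String) : List String :=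
  let ref_ungapped := refs.map (pvUngap gap_chars)
  let pred_ungapped := preds.map (pvUngap gap_chars)
  -- Counter(xs) == Counter(ys) (dict ==, order-blind) ⟺ the lists are permutations
  if ref_ungapped.Perm pred_ungapped then
    let idx_map := (PySem.List.enumerate pred_ungapped).foldl
      (fun d ju => d.modify ju.2 [] (· ++ [ju.1])) PySem.Dict.empty
    (ref_ungapped.foldl (fun st u =>
      match st.1.getD u [] with
      | [] => (st.1, st.2 ++ [""])                  -- pop(0) IndexError: excluded by Pre_
      | j :: rest => (st.1.insert u rest, st.2 ++ [(PySem.List.pyGet? preds j).getD ""]))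
      (idx_map, ([] : List String))).2
  else []                                           -- AssertionError: excluded by Pre_

-- ===== PORT B =====
def reorder_by_sequences_alt (refs : List String) (preds : List String) (gap_chars : List String) : List String :=
  let ref_ungapped := refs.map (pvUngap gap_chars)
  let pred_ungapped := preds.map (pvUngap gap_chars)
  -- sorted(ref_ungapped) == sorted(pred_ungapped)
  if PySem.List.sorted ref_ungapped (fun x => x) false
      = PySem.List.sorted pred_ungapped (fun x => x) false then
    -- sorted(range(n), key=lambda i: ref_ungapped[i]); the key's indexing is exact
    -- via pyGetD since every i produced by range(n) is in range
    let ref_order := PySem.List.sorted (PySem.List.pyRange 0 (refs.length : Int) 1)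
      (fun i => PySem.List.pyGetD ref_ungapped i "") false
    let pred_order := PySem.List.sorted (PySem.List.pyRange 0 (preds.length : Int) 1)
      (fun j => PySem.List.pyGetD pred_ungapped j "") false
    -- result = [None]*n; for i, j in zip(...): result[i] = preds[j]
    -- (pySetD/pyGetD are exact here: the zipped indices are in range); under Pre_
    -- every slot is written, so the final 'Option.getD ""' never fires
    ((ref_order.zip pred_order).foldl
      (fun r ij => PySem.List.pySetD r ij.1 (some (PySem.List.pyGetD preds ij.2 "")))
      (List.replicate refs.length (none : Option String))).map (fun o => o.getD "")
  else []                                           -- AssertionError: excluded by Pre_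

-- ===== PRECONDITION & SPEC =====
-- Pre_ excludes exactly the inputs on which A's assert fails (AssertionError): the
-- ungapped refs and preds must be equal as multisets.
def Pre_reorder_by_sequences (refs : List String) (preds : List String) (gap_chars : List String) : Prop :=
  (refs.map (pvUngap gap_chars)).Perm (preds.map (pvUngap gap_chars))
instance (refs : List String) (preds : List String) (gap_chars : List String) : Decidable (Pre_reorder_by_sequences refs preds gap_chars) := by unfold Pre_reorder_by_sequences; infer_instance

def pvWitness_reorder_by_sequences : List String × List String × List String :=
  (["a-b", "c", "ab"], ["c.", "ab", "a--b"], ["-", "."])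

def Spec_reorder_by_sequences (refs : List String) (preds : List String) (gap_chars : List String) (out : List String) : Prop := out = reorder_by_sequences_alt refs preds gap_chars
instance (refs : List String) (preds : List String) (gap_chars : List String) (out : List String) : Decidable (Spec_reorder_by_sequences refs preds gap_chars out) := by unfold Spec_reorder_by_sequences; infer_instance

-- ===== CLAIM (what is proved, stated in full; the proofs are below) =====
def Claim_equal_reorder_by_sequences : Prop := ∀ (refs : List String) (preds : List String) (gap_chars : List String), Dom_reorder_by_sequences refs preds gap_chars → Pre_reorder_by_sequences refs preds gap_chars → Spec_reorder_by_sequences refs preds gap_chars (reorder_by_sequences refs preds gap_chars)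

-- ===== LEMMAS AND PROOFS =====

-- ghost intermediate: remove the first pool entry whose ungapped value is u
def pvExtract (u : String) : List (String × String) → Option (String × List (String × String))
  | [] => none
  | x :: rest =>
    if x.1 == u then some (x.2, rest)
    else match pvExtract u rest with
      | none => none
      | some (p, r) => some (p, x :: r)

-- the per-position specification both programs are reduced to: position i receives
-- the c-th pred whose ungapped value is u, where u is ref i's ungapped value and
-- c is the number of earlier refs with that same ungapped value
def pvSpecAt (R : List String) (pool : List (String × String)) (t : Nat) : String :=
  ((pool.filter (fun x => x.1 == R.getD t "")).map Prod.snd).getD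
    ((R.take t).countP (fun v => v == R.getD t "")) ""

lemma pvExtract_isSome (u : String) : ∀ (pool : List (String × String)),
    u ∈ pool.map Prod.fst → (pvExtract u pool).isSome := by
  intro pool
  induction pool with
  | nil => simp
  | cons x rest ih =>
    intro hmem
    simp only [pvExtract]
    by_cases hx : (x.1 == u) = true
    · rw [if_pos hx]; simp
    · rw [if_neg hx]
      have hu : u ∈ rest.map Prod.fst := by
        simp only [List.map_cons, List.mem_cons] at hmem
        rcases hmem with h | h
        · exact absurd (beq_iff_eq.mpr h.symm) hx
        · exact h
      have hsome := ih hu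
      rcases h : pvExtract u rest with _ | ⟨p, r⟩
      · rw [h] at hsome; exact absurd hsome (by simp)
      · rfl

lemma pvExtract_spec (u : String) : ∀ (pool : List (String × String)) (p : String)
    (r : List (String × String)), pvExtract u pool = some (p, r) →
    ((pool.filter (fun x => x.1 == u)).map Prod.snd
        = p :: (r.filter (fun x => x.1 == u)).map Prod.snd)
    ∧ (∀ v, v ≠ u → (r.filter (fun x => x.1 == v)).map Prod.snd
        = (pool.filter (fun x => x.1 == v)).map Prod.snd)
    ∧ (u :: r.map Prod.fst).Perm (pool.map Prod.fst) := by
  intro pool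
  induction pool with
  | nil => intro p r h; simp [pvExtract] at h
  | cons x rest ih =>
    intro p r h
    simp only [pvExtract] at h
    by_cases hx : (x.1 == u) = true
    · rw [if_pos hx] at h
      simp only [Option.some.injEq, Prod.mk.injEq] at h
      obtain ⟨hp, hr⟩ := h
      subst hp hr
      have hxu : x.1 = u := by simpa using hx
      refine ⟨by simp [hx], ?_, ?_⟩
      · intro v hv
        have : (x.1 == v) = false := by simp [hxu]; exact fun hc => hv hc.symm
        simp [this]
      · simp [hxu]
    · rw [if_neg hx] at h
      rcases hrec : pvExtract u rest with _ | ⟨q, r'⟩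
      · rw [hrec] at h; simp at h
      · rw [hrec] at h
        simp only [Option.some.injEq, Prod.mk.injEq] at h
        obtain ⟨hp, hr⟩ := h
        subst hp
        obtain ⟨ih1, ih2, ih3⟩ := ih q r' hrec
        subst hr
        refine ⟨?_, ?_, ?_⟩
        · simp only [Bool.not_eq_true] at hx
          simpa [List.filter_cons, hx] using ih1
        · intro v hv
          by_cases hxv : (x.1 == v) = true
          · simp [hxv, ih2 v hv]
          · simp only [Bool.not_eq_true] at hxv
            simp [hxv, ih2 v hv]
        · simp only [List.map_cons]
          exact ((List.Perm.swap x.1 u _).trans (ih3.cons x.1))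

-- the built index map, read through preds[j], is the filtered pool
lemma pvIndex_eq_pool (u : String) (f : String → String) : ∀ (rest pre : List String),
    ((PySem.List.enumerate (rest.map f) (pre.length : Int)).filter (fun ju => ju.2 == u)).map
        (fun ju => (PySem.List.pyGet? (pre ++ rest) ju.1).getD "")
    = ((rest.map (fun p => (f p, p))).filter (fun x => x.1 == u)).map Prod.snd := by
  intro rest
  induction rest with
  | nil => intro pre; simp [PySem.List.enumerate_nil]
  | cons x rest ih =>
    intro pre
    have harr : (pre ++ [x]) ++ rest = pre ++ x :: rest := by simp
    have hlen : ((pre ++ [x]).length : Int) = (pre.length : Int) + 1 := by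
      simp
    have hhead : (PySem.List.pyGet? (pre ++ x :: rest) ((pre.length : Nat) : Int)).getD "" = x := by
      rw [PySem.List.pyGet?_append_length]; rfl
    have ih' := ih (pre ++ [x])
    rw [harr, hlen] at ih'
    simp only [List.map_cons, PySem.List.enumerate_cons, List.filter_cons]
    by_cases hx : (f x == u) = true
    · simp only [hx, if_pos, List.map_cons, ih', hhead]
    · simp only [Bool.not_eq_true] at hx
      simp only [hx, Bool.false_eq_true, if_false, ih']

-- A's dict-of-queues loop computes the same list as the ghost pool-extraction loop
lemma pvLoop_eq (preds : List String) : ∀ (R : List String) (d : PySem.Dict String (List Int))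
    (pool : List (String × String)) (acc : List String),
    (∀ u, (d.getD u []).map (fun j => (PySem.List.pyGet? preds j).getD "")
        = (pool.filter (fun x => x.1 == u)).map Prod.snd) →
    R.Perm (pool.map Prod.fst) →
    (R.foldl (fun st u =>
      match st.1.getD u [] with
      | [] => (st.1, st.2 ++ [""])
      | j :: rest => (st.1.insert u rest, st.2 ++ [(PySem.List.pyGet? preds j).getD ""]))
      (d, acc)).2
    = (R.foldl (fun st u =>
      match pvExtract u st.1 with
      | none => (st.1, st.2 ++ [""])
      | some (p, r) => (r, st.2 ++ [p]))
      (pool, acc)).2 := by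
  intro R
  induction R with
  | nil => intro d pool acc _ _; rfl
  | cons u R ih =>
    intro d pool acc hQ hperm
    have humem : u ∈ pool.map Prod.fst := hperm.mem_iff.mp (List.mem_cons_self)
    have hsome := pvExtract_isSome u pool humem
    rcases hx : pvExtract u pool with _ | ⟨p, r⟩
    · rw [hx] at hsome; exact absurd hsome (by simp)
    · obtain ⟨h1, h2, h3⟩ := pvExtract_spec u pool p r hx
      have hQu := hQ u
      rw [h1] at hQu
      rcases hq : d.getD u [] with _ | ⟨j, qrest⟩
      · rw [hq] at hQu; simp at hQu
      · rw [hq] at hQu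
        simp only [List.map_cons, List.cons.injEq] at hQu
        obtain ⟨hj, hqrest⟩ := hQu
        simp only [List.foldl_cons, hx, hq, hj]
        apply ih
        · intro v
          by_cases hv : v = u
          · subst hv
            rw [PySem.Dict.getD_insert_self]
            exact hqrest
          · rw [PySem.Dict.getD_insert, if_neg hv]
            rw [hQ v, h2 v hv]
        · exact (hperm.trans h3.symm).cons_inv

-- the pool-extraction loop computes exactly pvSpecAt at every position
lemma pvPool_eq_spec : ∀ (R : List String) (pool : List (String × String)) (acc : List String),
    R.Perm (pool.map Prod.fst) →
    (R.foldl (fun st u =>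
      match pvExtract u st.1 with
      | none => (st.1, st.2 ++ [""])
      | some (p, r) => (r, st.2 ++ [p]))
      (pool, acc)).2
    = acc ++ (List.range R.length).map (pvSpecAt R pool) := by
  intro R
  induction R with
  | nil => intro pool acc _; simp
  | cons u R ih =>
    intro pool acc hperm
    have humem : u ∈ pool.map Prod.fst := hperm.mem_iff.mp (List.mem_cons_self)
    have hsome := pvExtract_isSome u pool humem
    rcases hx : pvExtract u pool with _ | ⟨p, r⟩
    · rw [hx] at hsome; exact absurd hsome (by simp)
    · obtain ⟨h1, h2, h3⟩ := pvExtract_spec u pool p r hx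
      have hperm' : R.Perm (r.map Prod.fst) := (hperm.trans h3.symm).cons_inv
      simp only [List.foldl_cons, hx]
      rw [ih r (acc ++ [p]) hperm']
      rw [List.length_cons, List.range_succ_eq_map]
      simp only [List.map_cons, List.map_map]
      have hhead : pvSpecAt (u :: R) pool 0 = p := by
        simp only [pvSpecAt, List.getD_cons_zero, List.take_zero, List.countP_nil]
        rw [h1]; rfl
      have htail : ∀ t : Nat, pvSpecAt (u :: R) pool (t + 1) = pvSpecAt R r t := by
        intro t
        simp only [pvSpecAt, List.getD_cons_succ, List.take_succ_cons, List.countP_cons]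
        by_cases hu : (u == R.getD t "") = true
        · have hueq : u = R.getD t "" := by simpa using hu
          rw [← hueq, h1]
          simp
        · simp only [hu, Bool.false_eq_true, if_false, Nat.add_zero]
          rw [h2 (R.getD t "") (fun hc => hu (beq_iff_eq.mpr hc.symm))]
      have hmap : List.map (pvSpecAt (u :: R) pool ∘ Nat.succ) (List.range R.length)
          = List.map (pvSpecAt R r) (List.range R.length) :=
        List.map_congr_left (fun t _ => htail t)
      rw [hhead, hmap, List.append_assoc]; rfl

-- stability of insertion into a key-sorted list: insertBy places x after all equals
lemma pvFilter_insertBy {α κ : Type} [LinearOrder κ] [BEq κ] [LawfulBEq κ]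
    (key : α → κ) (x : α) : ∀ (ys : List α),
    ys.Pairwise (fun a b => key a ≤ key b) → ∀ (u : κ),
    (PySem.List.insertBy (fun a b => decide (key a < key b)) x ys).filter (fun y => key y == u)
      = ys.filter (fun y => key y == u) ++ (if key x == u then [x] else []) := by
  intro ys
  induction ys with
  | nil =>
    intro _ u
    simp only [PySem.List.insertBy, List.filter_nil, List.nil_append]
    by_cases h : (key x == u) = true <;> simp [h, List.filter]
  | cons y ys ih =>
    intro hpw u
    obtain ⟨hy, hpw'⟩ := List.pairwise_cons.mp hpw
    simp only [PySem.List.insertBy]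
    by_cases hlt : decide (key x < key y) = true
    · rw [if_pos hlt]
      have hxy : key x < key y := of_decide_eq_true hlt
      -- every element of y :: ys has key > key x, so none equals u when key x == u
      by_cases hxu : (key x == u) = true
      · have hxku : key x = u := by simpa using hxu
        have hnone : ∀ z ∈ y :: ys, (key z == u) = false := by
          intro z hz
          have : key x < key z := by
            rcases List.mem_cons.mp hz with h | h
            · subst h; exact hxy
            · exact lt_of_lt_of_le hxy (hy z h)
          rw [← hxku]
          simp [Bool.eq_false_iff]
          exact fun hc => absurd hc.symm (ne_of_lt this)
        have h1 : (y :: ys).filter (fun z => key z == u) = [] :=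
          List.filter_eq_nil_iff.mpr (fun z hz => by simp [hnone z hz])
        simp [hxu, h1]
      · simp only [Bool.not_eq_true] at hxu
        simp [List.filter_cons, hxu]
    · rw [if_neg hlt]
      simp only [List.filter_cons]
      rw [ih hpw' u]
      by_cases hyu : (key y == u) = true <;> simp [hyu]

-- stability of Python's sorted: the elements with a given key value keep their order
lemma pvSorted_filter {α κ : Type} [LinearOrder κ] [BEq κ] [LawfulBEq κ]
    (xs : List α) (key : α → κ) (u : κ) :
    (PySem.List.sorted xs key false).filter (fun y => key y == u)
      = xs.filter (fun y => key y == u) := by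
  induction xs using List.reverseRecOn with
  | nil => rfl
  | append_singleton xs x ih =>
    rw [PySem.List.sorted_eq_foldl_insertBy, List.foldl_append, List.foldl_cons, List.foldl_nil,
      ← PySem.List.sorted_eq_foldl_insertBy]
    rw [pvFilter_insertBy key x _ (PySem.List.sorted_pairwise xs key) u, ih,
      List.filter_append]
    congr 1
    by_cases h : (key x == u) = true <;> simp [h, List.filter]

-- insertBy commutes with map
lemma pvInsertBy_map {α β : Type} (before : β → β → Bool) (f : α → β) (x : α) :
    ∀ (ys : List α), PySem.List.insertBy before (f x) (ys.map f)
      = (PySem.List.insertBy (fun a b => before (f a) (f b)) x ys).map f := by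
  intro ys
  induction ys with
  | nil => rfl
  | cons y ys ih =>
    simp only [List.map_cons, PySem.List.insertBy]
    by_cases h : before (f x) (f y) = true
    · rw [if_pos h, if_pos h]; rfl
    · rw [if_neg h, if_neg h, List.map_cons, ih]

-- sorted commutes with map
lemma pvSorted_map {α β κ : Type} [LT κ] [DecidableLT κ] (f : α → β) (key : β → κ)
    (xs : List α) : PySem.List.sorted (xs.map f) key false
      = (PySem.List.sorted xs (fun a => key (f a)) false).map f := by
  rw [PySem.List.sorted_eq_foldl_insertBy, PySem.List.sorted_eq_foldl_insertBy]
  have : ∀ (l : List α) (acc : List α),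
      List.foldl (fun acc x => PySem.List.insertBy (fun a b => decide (key a < key b)) x acc)
        (acc.map f) (l.map f)
      = (List.foldl (fun acc x =>
          PySem.List.insertBy (fun a b => decide (key (f a) < key (f b))) x acc) acc l).map f := by
    intro l
    induction l with
    | nil => intro acc; rfl
    | cons z l ihl =>
      intro acc
      simp only [List.map_cons, List.foldl_cons]
      rw [pvInsertBy_map (fun a b => decide (key a < key b)) f z acc, ihl]
  simpa using this xs []

-- the key image of a key-sorted list is the sorted key list
lemma pvMap_key_sorted {α κ : Type} [LinearOrder κ] (xs : List α) (key : α → κ) :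
    (PySem.List.sorted xs key false).map key
      = PySem.List.sorted (xs.map key) (fun x => x) false := by
  symm
  apply PySem.List.sorted_id_eq_of_perm_of_pairwise
  · exact (PySem.List.sorted_perm xs key false).map key
  · exact (PySem.List.sorted_pairwise xs key).map key (fun a b h => h)

-- the c-th element (c = matches among the first t) of the filtered list is S[t]
lemma pvFilter_getD_rank {α : Type} (S : List α) (p : α → Bool) (t : Nat)
    (ht : t < S.length) (hp : p S[t] = true) (d : α) :
    (S.filter p).getD ((S.take t).countP p) d = S[t] := by
  have hS : S = S.take t ++ S[t] :: S.drop (t + 1) := by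
    conv_lhs => rw [← List.take_append_drop t S]
    rw [List.drop_eq_getElem_cons ht]
  have hfil : S.filter p = (S.take t).filter p ++ S[t] :: (S.drop (t + 1)).filter p := by
    conv_lhs => rw [hS]
    rw [List.filter_append, List.filter_cons_of_pos hp]
  rw [hfil, List.countP_eq_length_filter, List.getD_eq_getElem?_getD,
    List.getElem?_append_right (le_refl _)]
  simp

lemma pvCountP_take_lt {α : Type} (S : List α) (p : α → Bool) (t : Nat)
    (ht : t < S.length) (hp : p S[t] = true) :
    (S.take t).countP p < (S.filter p).length := by
  have hS : S = S.take t ++ S[t] :: S.drop (t + 1) := by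
    conv_lhs => rw [← List.take_append_drop t S]
    rw [List.drop_eq_getElem_cons ht]
  have hfil : S.filter p = (S.take t).filter p ++ S[t] :: (S.drop (t + 1)).filter p := by
    conv_lhs => rw [hS]
    rw [List.filter_append, List.filter_cons_of_pos hp]
  rw [List.countP_eq_length_filter, hfil]
  simp

-- the c-th position satisfying p has exactly c earlier positions satisfying p
lemma pvRange_filter_rank (p : Nat → Bool) : ∀ (n c i : Nat),
    c < ((List.range n).filter p).length → ((List.range n).filter p).getD c 0 = i →
    (List.range i).countP p = c ∧ p i = true ∧ i < n := by
  intro n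
  induction n with
  | zero => intro c i hc; simp at hc
  | succ n ih =>
    intro c i hc hi
    rw [List.range_succ, List.filter_append] at hc hi
    by_cases h : c < ((List.range n).filter p).length
    · rw [List.getD_eq_getElem?_getD, List.getElem?_append_left h,
        ← List.getD_eq_getElem?_getD] at hi
      obtain ⟨h1, h2, h3⟩ := ih c i h hi
      exact ⟨h1, h2, Nat.lt_succ_of_lt h3⟩
    · rw [Nat.not_lt] at h
      by_cases hpn : p n = true
      · rw [List.filter_cons_of_pos hpn, List.filter_nil] at hc hi
        have hlen : c = ((List.range n).filter p).length := by
          simp at hc; omega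
        rw [List.getD_eq_getElem?_getD, List.getElem?_append_right h, hlen] at hi
        simp at hi
        subst hi
        refine ⟨?_, hpn, Nat.lt_succ_self n⟩
        rw [List.countP_eq_length_filter, hlen]
      · rw [List.filter_cons_of_neg hpn, List.filter_nil, List.append_nil] at hc
        omega

lemma pvMap_getD_range {α : Type} (l : List α) (i : Nat) (hi : i ≤ l.length) (d : α) :
    (List.range i).map (fun k => l.getD k d) = l.take i := by
  apply List.ext_getElem
  · simp; omega
  · intro k h1 h2
    simp only [List.getElem_map, List.getElem_range, List.getElem_take]
    rw [List.getD_eq_getElem]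

-- scatter: positions not assigned keep their value
lemma pvScatter_untouched {α β : Type} (f : β → α) :
    ∀ (P : List Nat) (Q : List β) (init : List (Option α)) (i : Nat), i ∉ P →
    ((P.zip Q).foldl (fun r ij => r.set ij.1 (some (f ij.2))) init).getD i none
      = init.getD i none := by
  intro P
  induction P with
  | nil => intro Q init i _; rfl
  | cons a P ih =>
    intro Q init i hi
    cases Q with
    | nil => rfl
    | cons b Q =>
      simp only [List.zip_cons_cons, List.foldl_cons]
      rw [ih Q _ i (fun h => hi (List.mem_cons_of_mem a h))]
      have hne : a ≠ i := fun h => hi (h ▸ List.mem_cons_self)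
      rw [List.getD_eq_getElem?_getD, List.getD_eq_getElem?_getD,
        List.getElem?_set_ne hne]

lemma pvScatter_length {α β : Type} (f : β → α) :
    ∀ (P : List Nat) (Q : List β) (init : List (Option α)),
    ((P.zip Q).foldl (fun r ij => r.set ij.1 (some (f ij.2))) init).length
      = init.length := by
  intro P
  induction P with
  | nil => intro Q init; rfl
  | cons a P ih =>
    intro Q init
    cases Q with
    | nil => rfl
    | cons b Q =>
      simp only [List.zip_cons_cons, List.foldl_cons]
      rw [ih Q _, List.length_set]

-- scatter: position P[t] receives f Q[t] (P has no duplicates)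
lemma pvScatter_getD {α β : Type} (f : β → α) :
    ∀ (P : List Nat) (Q : List β) (init : List (Option α)) (t : Nat)
    (ht : t < P.length) (htQ : t < Q.length), P.Nodup → P[t] < init.length →
    ((P.zip Q).foldl (fun r ij => r.set ij.1 (some (f ij.2))) init).getD P[t] none
      = some (f Q[t]) := by
  intro P
  induction P with
  | nil => intro Q init t ht; simp at ht
  | cons a P ih =>
    intro Q init t ht htQ hnd hlt
    cases Q with
    | nil => simp at htQ
    | cons b Q =>
      simp only [List.zip_cons_cons, List.foldl_cons]
      obtain ⟨hna, hnd'⟩ := List.nodup_cons.mp hnd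
      cases t with
      | zero =>
        simp only [List.getElem_cons_zero] at hlt ⊢
        rw [pvScatter_untouched f P Q _ a hna]
        rw [List.getD_eq_getElem?_getD, List.getElem?_set_self (by simpa using hlt)]
        rfl
      | succ t =>
        simp only [List.getElem_cons_succ] at hlt ⊢
        exact ih Q _ t (by simpa using ht) (by simpa using htQ) hnd' (by simpa using hlt)

-- B's sorted/zip/scatter block computes exactly pvSpecAt at every position
lemma pvAlt_eq_spec (refs preds : List String) (gc : List String)
    (hperm : (refs.map (pvUngap gc)).Perm (preds.map (pvUngap gc))) :
    reorder_by_sequences_alt refs preds gc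
      = (List.range refs.length).map
          (pvSpecAt (refs.map (pvUngap gc)) (preds.map (fun p => (pvUngap gc p, p)))) := by
  have hRlen : (refs.map (pvUngap gc)).length = refs.length := List.length_map _
  have hPlen' : (preds.map (pvUngap gc)).length = preds.length := List.length_map _
  set R := refs.map (pvUngap gc) with hR
  set P := preds.map (pvUngap gc) with hP
  have hlen : preds.length = refs.length := by
    have := hperm.length_eq
    omega
  have hsortRP : PySem.List.sorted R (fun x => x) false
      = PySem.List.sorted P (fun x => x) false :=
    PySem.List.sorted_eq_sorted_of_perm R P (fun x => x) (fun _ _ h => h) hperm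
  have hrange : ∀ m : Nat, PySem.List.pyRange 0 (m : Int) 1
      = (List.range m).map (fun k : Nat => (k : Int)) := by
    intro m
    rw [PySem.List.pyRange_one]
    have h1 : ((m : Int) - 0).toNat = m := by omega
    rw [h1]
    simp only [zero_add]
  have hcastkey : ∀ (L : List String),
      (fun k : Nat => PySem.List.pyGetD L ((fun k : Nat => (k : Int)) k) "")
        = (fun k : Nat => L.getD k "") :=
    fun L => funext (fun k => PySem.List.pyGetD_natCast L k "")
  simp only [reorder_by_sequences_alt, ← hR, ← hP]
  rw [if_pos hsortRP, hrange refs.length, hrange preds.length,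
    pvSorted_map (fun k : Nat => (k : Int)), pvSorted_map (fun k : Nat => (k : Int)),
    hcastkey R, hcastkey P]
  set Pnat := PySem.List.sorted (List.range refs.length) (fun k => R.getD k "") false with hPnat
  set Qnat := PySem.List.sorted (List.range preds.length) (fun k => P.getD k "") false with hQnat
  rw [List.zip_map, List.foldl_map]
  simp only [Prod.map_fst, Prod.map_snd, PySem.List.pySetD_natCast, PySem.List.pyGetD_natCast]
  -- facts about the two sorted index lists
  have hPperm : Pnat.Perm (List.range refs.length) := PySem.List.sorted_perm _ _ _
  have hQperm : Qnat.Perm (List.range preds.length) := PySem.List.sorted_perm _ _ _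
  have hPlen : Pnat.length = refs.length := by rw [hPperm.length_eq, List.length_range]
  have hQlen : Qnat.length = refs.length := by rw [hQperm.length_eq, List.length_range, hlen]
  have hPnd : Pnat.Nodup := hPperm.nodup_iff.mpr List.nodup_range
  have hRid : (List.range refs.length).map (fun k => R.getD k "") = R := by
    rw [pvMap_getD_range R refs.length (le_of_eq hRlen.symm) "", ← hRlen, List.take_length]
  have hPid : (List.range preds.length).map (fun k => P.getD k "") = P := by
    rw [pvMap_getD_range P preds.length (le_of_eq hPlen'.symm) "", ← hPlen', List.take_length]
  have hE : Pnat.map (fun k => R.getD k "") = Qnat.map (fun k => P.getD k "") := by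
    rw [hPnat, hQnat, pvMap_key_sorted, pvMap_key_sorted, hRid, hPid, hsortRP]
  -- extensional equality, position by position
  apply List.ext_getElem
  · rw [List.length_map, pvScatter_length (fun j => preds.getD j ""),
      List.length_replicate, List.length_map, List.length_range]
  intro i h1 h2
  have hi : i < refs.length := by simpa using h2
  have himem : i ∈ Pnat := hPperm.mem_iff.mpr (List.mem_range.mpr hi)
  have ht : Pnat.idxOf i < Pnat.length := List.idxOf_lt_length_of_mem himem
  set t := Pnat.idxOf i with htdef
  have hPt : Pnat[t] = i := List.getElem_idxOf ht
  have htQ : t < Qnat.length := by omega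
  set u := R.getD i "" with hu
  have hpR : (fun k => R.getD k "" == u) Pnat[t] = true := by
    simp only [hPt, ← hu, beq_self_eq_true]
  have hkey_t : R.getD Pnat[t] "" = P.getD Qnat[t] "" := by
    have h1' : t < (Pnat.map (fun k => R.getD k "")).length := by
      rw [List.length_map]; exact ht
    have := List.getElem_of_eq hE h1'
    simpa using this
  have hpP : (fun k => P.getD k "" == u) Qnat[t] = true := by
    simp only [← hkey_t, hPt, ← hu, beq_self_eq_true]
  have hcQ : (Qnat.take t).countP (fun k => P.getD k "" == u)
      = (Pnat.take t).countP (fun k => R.getD k "" == u) := by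
    have hgen : ∀ (S : List Nat) (key : Nat → String),
        (S.take t).countP (fun k => key k == u)
          = ((S.map key).take t).countP (fun v => v == u) := by
      intro S key; rw [← List.map_take, List.countP_map]; rfl
    rw [hgen Qnat (fun k => P.getD k ""), ← hE, ← hgen Pnat (fun k => R.getD k "")]
  -- the matched pred position
  have hrankQ := pvFilter_getD_rank Qnat (fun k => P.getD k "" == u) t htQ hpP 0
  rw [hcQ] at hrankQ
  have hcltQ := pvCountP_take_lt Qnat (fun k => P.getD k "" == u) t htQ hpP
  rw [hcQ] at hcltQ
  have hstabQ : Qnat.filter (fun k => P.getD k "" == u)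
      = (List.range preds.length).filter (fun k => P.getD k "" == u) :=
    pvSorted_filter (List.range preds.length) (fun k => P.getD k "") u
  have hpredeq : (List.range preds.length).filter (fun k => P.getD k "" == u)
      = (List.range preds.length).filter (fun k => pvUngap gc (preds.getD k "") == u) := by
    apply List.filter_congr
    intro k hk
    have hkm := List.mem_range.mp hk
    have e1 : P.getD k "" = pvUngap gc (preds.getD k "") := by
      rw [hP, List.getD_eq_getElem _ _ (by rw [← hP, hPlen']; exact hkm),
        List.getElem_map, List.getD_eq_getElem _ _ hkm]
    rw [e1]
  have hself : (List.range preds.length).map (fun k => preds.getD k "") = preds := by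
    rw [pvMap_getD_range preds preds.length le_rfl "", List.take_length]
  have hL9 : ((List.range preds.length).filter
        (fun k => pvUngap gc (preds.getD k "") == u)).map (fun k => preds.getD k "")
      = preds.filter (fun p' => pvUngap gc p' == u) := by
    conv_rhs => rw [← hself]
    rw [List.filter_map]
    simp only [Function.comp_def]
  have hcFR : (Pnat.take t).countP (fun k => R.getD k "" == u)
      < ((List.range preds.length).filter (fun k => pvUngap gc (preds.getD k "") == u)).length := by
    rw [← hpredeq, ← hstabQ]; exact hcltQ
  have hQt : Qnat[t] = ((List.range preds.length).filter
      (fun k => pvUngap gc (preds.getD k "") == u))[(Pnat.take t).countP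
        (fun k => R.getD k "" == u)]'hcFR := by
    rw [← hrankQ, hstabQ, hpredeq, List.getD_eq_getElem _ _ hcFR]
  have hvalQ : preds.getD Qnat[t] ""
      = (preds.filter (fun p' => pvUngap gc p' == u)).getD
          ((Pnat.take t).countP (fun k => R.getD k "" == u)) "" := by
    rw [hQt]
    have hcF2 : (Pnat.take t).countP (fun k => R.getD k "" == u)
        < (preds.filter (fun p' => pvUngap gc p' == u)).length := by
      rw [← hL9, List.length_map]; exact hcFR
    rw [List.getD_eq_getElem _ _ hcF2, ← List.getElem_of_eq hL9 (by rw [List.length_map]; exact hcFR),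
      List.getElem_map]
  -- the count among earlier refs
  have hrankP := pvFilter_getD_rank Pnat (fun k => R.getD k "" == u) t ht hpR 0
  have hcltP := pvCountP_take_lt Pnat (fun k => R.getD k "" == u) t ht hpR
  have hstabP : Pnat.filter (fun k => R.getD k "" == u)
      = (List.range refs.length).filter (fun k => R.getD k "" == u) :=
    pvSorted_filter (List.range refs.length) (fun k => R.getD k "") u
  obtain ⟨hcount, hpi, hin⟩ := pvRange_filter_rank (fun k => R.getD k "" == u) refs.length
    ((Pnat.take t).countP (fun k => R.getD k "" == u)) i
    (by rw [← hstabP]; exact hcltP) (by rw [← hstabP, hrankP, hPt])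
  have htake : (R.take i).countP (fun v => v == u)
      = (Pnat.take t).countP (fun k => R.getD k "" == u) := by
    rw [← hcount, ← pvMap_getD_range R i (by omega) "", List.countP_map]
    rfl
  -- assemble
  have hscat := pvScatter_getD (fun j => preds.getD j "") Pnat Qnat
    (List.replicate refs.length (none : Option String)) t ht htQ hPnd
    (by rw [hPt, List.length_replicate]; exact hi)
  rw [hPt] at hscat
  have hfoldlen : ((Pnat.zip Qnat).foldl
      (fun r ij => r.set ij.1 (some (preds.getD ij.2 "")))
      (List.replicate refs.length (none : Option String))).length = refs.length := by
    rw [pvScatter_length (fun j => preds.getD j ""), List.length_replicate]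
  have hifold : i < ((Pnat.zip Qnat).foldl
      (fun r ij => r.set ij.1 (some (preds.getD ij.2 "")))
      (List.replicate refs.length (none : Option String))).length := by
    rw [hfoldlen]; exact hi
  rw [List.getElem_map, List.getElem_map, List.getElem_range]
  rw [← List.getD_eq_getElem _ (none : Option String) hifold, hscat]
  simp only [Option.getD_some]
  rw [hvalQ]
  simp only [pvSpecAt, ← hu, List.filter_map, List.map_map, Function.comp_def, List.map_id']
  rw [htake]

-- ===== VERDICT (by name: the statement is the Claim_ definition above) =====
theorem reorder_by_sequences_spec : Claim_equal_reorder_by_sequences := by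
  intro refs preds gc hdom hpre
  unfold Spec_reorder_by_sequences
  unfold Pre_reorder_by_sequences at hpre
  have hpm : ((preds.map (fun p => (pvUngap gc p, p))).map Prod.fst) = preds.map (pvUngap gc) := by
    simp
  rw [pvAlt_eq_spec refs preds gc hpre]
  simp only [reorder_by_sequences]
  rw [if_pos hpre]
  have hpool : (refs.map (pvUngap gc)).Perm
      ((preds.map (fun p => (pvUngap gc p, p))).map Prod.fst) := by
    rw [hpm]; exact hpre
  rw [pvLoop_eq preds (refs.map (pvUngap gc)) _ _ [] ?_ hpool]
  · rw [pvPool_eq_spec _ _ _ hpool]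
    simp
  · intro u
    have h0 := PySem.Dict.getD_foldl_modify_append
      (l := (PySem.List.enumerate (preds.map (pvUngap gc)) 0).map (fun ju => (ju.2, ju.1)))
      (d := (PySem.Dict.empty : PySem.Dict String (List Int))) (c := u)
    rw [List.foldl_map] at h0
    rw [h0]
    have hidx := pvIndex_eq_pool u (pvUngap gc) preds []
    simp only [List.length_nil, Nat.cast_zero, List.nil_append] at hidx
    simpa [PySem.Dict.getD_empty, List.filter_map, List.map_map, Function.comp_def] using hidx
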